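-- pv_equiv track=rewrite | github.com/domestoscoockie/python | minesweeper_pygame/__main__.py | making_number
-- ===== SOURCE A (Python) =====
-- def making_number(i_0):
--     if i_0 == 0 or i_0 % 8==0:
--         list_of_numbers_1 = [i_0-8,i_0-7,i_0+1,i_0+8,i_0+9]
--     elif (i_0+1) % 8 == 0:
--         list_of_numbers_1 = [i_0-9,i_0-8,i_0-1,i_0+7,i_0+8]
--     else:
--         list_of_numbers_1 = [i_0-9,i_0-8,i_0-7,i_0-1,i_0+1,i_0+7,i_0+8,i_0+9]
--
--     list_of_numbers_new = []
--     for i in list_of_numbers_1: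
--         if i <= 63 and i >= 0 :
--                 list_of_numbers_new.append(i)
--
--     return list_of_numbers_new
-- ===== SOURCE B (Python) =====
-- def making_number(i_0):
--     r, c = divmod(i_0, 8)
--     out = []
--     for dr in (-1, 0, 1):
--         for dc in (-1, 0, 1):
--             if dr == 0 and dc == 0:
--                 continue
--             nr, nc = r + dr, c + dc
--             if 0 <= nr < 8 and 0 <= nc < 8:
--                 out.append(nr * 8 + nc)
--     return out
-- ===== Notes on version B (the rewrite author's own statement) =====
-- stated objective: idiomatic
-- what changed: B computes row and column via divmod(i_0, 8) and does a uniform bounded 3x3 neighbour scan, instead of A's per-column-class hardcoded offset lists followed by a [0,63] range filter.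
import Mathlib
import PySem

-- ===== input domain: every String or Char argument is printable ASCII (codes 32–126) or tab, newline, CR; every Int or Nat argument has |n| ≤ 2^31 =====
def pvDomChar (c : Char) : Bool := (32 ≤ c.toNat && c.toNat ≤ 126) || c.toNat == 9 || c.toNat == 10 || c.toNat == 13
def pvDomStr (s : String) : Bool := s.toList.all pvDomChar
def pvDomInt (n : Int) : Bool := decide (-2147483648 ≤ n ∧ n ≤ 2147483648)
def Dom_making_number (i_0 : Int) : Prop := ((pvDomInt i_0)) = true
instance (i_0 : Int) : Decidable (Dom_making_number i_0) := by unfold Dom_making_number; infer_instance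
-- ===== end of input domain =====

-- B replaces A's per-column hardcoded offset lists + [0,63] range filter with a uniform
-- 3×3 neighbour scan over (row, col) = divmod(i_0, 8); objective: idiomatic.

-- ===== PORT A =====
def making_number (i_0 : Int) : List Int :=
  let list_of_numbers_1 : List Int :=
    if i_0 == 0 || PySem.Int.mod i_0 8 == 0 then
      [i_0-8, i_0-7, i_0+1, i_0+8, i_0+9]
    else if PySem.Int.mod (i_0+1) 8 == 0 then
      [i_0-9, i_0-8, i_0-1, i_0+7, i_0+8]
    else
      [i_0-9, i_0-8, i_0-7, i_0-1, i_0+1, i_0+7, i_0+8, i_0+9]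
  list_of_numbers_1.foldl
    (fun list_of_numbers_new i =>
      if i ≤ 63 ∧ 0 ≤ i then list_of_numbers_new ++ [i] else list_of_numbers_new) []

-- ===== PORT B =====
/-- B's inner loop over the column offsets dc ∈ {-1, 0, 1}. -/
def innerB (r c dr : Int) (out : List Int) : List Int :=
  ([-1, 0, 1] : List Int).foldl (fun out dc =>
    if dr == 0 && dc == 0 then out
    else
      let nr := r + dr
      let nc := c + dc
      if 0 ≤ nr ∧ nr < 8 ∧ 0 ≤ nc ∧ nc < 8 then out ++ [nr * 8 + nc] else out) out

def making_number_alt (i_0 : Int) : List Int :=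
  let r := PySem.Int.floordiv i_0 8
  let c := PySem.Int.mod i_0 8
  ([-1, 0, 1] : List Int).foldl (fun out dr => innerB r c dr out) []

-- ===== PRECONDITION & SPEC =====
def Spec_making_number (i_0 : Int) (out : List Int) : Prop := out = making_number_alt i_0
instance (i_0 : Int) (out : List Int) : Decidable (Spec_making_number i_0 out) := by unfold Spec_making_number; infer_instance

-- ===== CLAIM (what is proved, stated in full; the proofs are below) =====
def Claim_equal_making_number : Prop := ∀ (i_0 : Int), Dom_making_number i_0 → Spec_making_number i_0 (making_number i_0)

-- ===== LEMMAS AND PROOFS =====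

/-- A's filter loop returns its accumulator unchanged when no element is in range. -/
theorem foldA_keep (xs : List Int) (acc : List Int)
    (h : ∀ x ∈ xs, ¬(x ≤ 63 ∧ 0 ≤ x)) :
    xs.foldl
      (fun list_of_numbers_new i =>
        if i ≤ 63 ∧ 0 ≤ i then list_of_numbers_new ++ [i] else list_of_numbers_new) acc
      = acc := by
  induction xs generalizing acc with
  | nil => rfl
  | cons y ys ih =>
    simp only [List.foldl]
    rw [if_neg (h y (by simp))]
    exact ih _ (fun x hx => h x (by simp [hx]))

/-- B's inner column loop returns its accumulator unchanged when the row is off-grid. -/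
theorem innerB_keep (r c dr : Int) (out : List Int)
    (h : ¬(0 ≤ r + dr ∧ r + dr < 8)) :
    innerB r c dr out = out := by
  simp only [innerB, List.foldl]
  split_ifs <;> first | rfl | (exfalso; omega)

theorem making_number_eq (i_0 : Int) : making_number i_0 = making_number_alt i_0 := by
  have hdm := PySem.Int.floordiv_mul_add_mod i_0 8
  have h0 : 0 ≤ PySem.Int.mod i_0 8 := PySem.Int.mod_nonneg i_0 (by norm_num)
  have h8 : PySem.Int.mod i_0 8 < 8 := PySem.Int.mod_lt i_0 (by norm_num)
  by_cases hlo : i_0 ≤ -17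
  · have hA : making_number i_0 = [] := by
      unfold making_number
      apply foldA_keep
      intro x hx
      split_ifs at hx <;> simp at hx <;> omega
    have hr : PySem.Int.floordiv i_0 8 ≤ -3 := by omega
    have k : ∀ dr ∈ ([-1, 0, 1] : List Int), ∀ out,
        innerB (PySem.Int.floordiv i_0 8) (PySem.Int.mod i_0 8) dr out = out := by
      intro dr hdr out
      apply innerB_keep
      simp at hdr
      omega
    have hB : making_number_alt i_0 = [] := by
      simp only [making_number_alt, List.foldl]
      rw [k (-1) (by simp), k 0 (by simp), k 1 (by simp)]
    rw [hA, hB]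
  · by_cases hhi : 80 ≤ i_0
    · have hA : making_number i_0 = [] := by
        unfold making_number
        apply foldA_keep
        intro x hx
        split_ifs at hx <;> simp at hx <;> omega
      have hr : 10 ≤ PySem.Int.floordiv i_0 8 := by omega
      have k : ∀ dr ∈ ([-1, 0, 1] : List Int), ∀ out,
          innerB (PySem.Int.floordiv i_0 8) (PySem.Int.mod i_0 8) dr out = out := by
        intro dr hdr out
        apply innerB_keep
        simp at hdr
        omega
      have hB : making_number_alt i_0 = [] := by
        simp only [making_number_alt, List.foldl]
        rw [k (-1) (by simp), k 0 (by simp), k 1 (by simp)]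
      rw [hA, hB]
    · have h1 : -16 ≤ i_0 := by omega
      have h2 : i_0 ≤ 79 := by omega
      interval_cases i_0 <;> decide

-- ===== VERDICT (by name: the statement is the Claim_ definition above) =====
theorem making_number_spec : Claim_equal_making_number := by
  intro i_0 _
  exact making_number_eq i_0
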